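-- pv_equiv track=rewrite | github.com/sam-caldwell/crsce | tools/b64a_sweep.py | dh_xh_cost
-- ===== SOURCE A (Python) =====
-- def diag_lengths(s):
--     """Return list of (diag_index, length) for non-toroidal diagonals, sorted by length."""
--     diags = []
--     for d in range(2 * s - 1):
--         l = min(d + 1, s, 2 * s - 1 - d)
--         diags.append((d, l))
--     diags.sort(key=lambda x: x[1])
--     return diags
--
-- def graduated_crc_bits(length, max_tier_width):
--     """Return CRC width for a line of given length under graduated scheme."""
--     if length <= 8: return 8
--     if length <= 16: return 16
--     if length <= 32: return 32
--     if length <= 64: return min(64, max_tier_width)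
--     if length <= 128: return min(128, max_tier_width)
--     return min(256, max_tier_width)
--
-- def dh_xh_cost(s, n_diags, max_tier_width):
--     """Cost in bits for DH or XH on n_diags shortest diagonals."""
--     dl = diag_lengths(s)
--     cost = 0
--     eqs = 0
--     for i in range(min(n_diags, len(dl))):
--         _, l = dl[i]
--         w = graduated_crc_bits(l, max_tier_width)
--         cost += w
--         eqs += w
--     return cost, eqs
-- ===== SOURCE B (Python) =====
-- def dh_xh_cost(s, n_diags, max_tier_width):
--     """Cost in bits for DH or XH on n_diags shortest diagonals.
--
--     Closed form: sorted diagonal lengths are 1,1,2,2,...,s-1,s-1,s, so the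
--     i-th shortest diagonal (0-based) has length i//2 + 1; count how many of
--     the first k indices fall in each CRC tier and multiply by the tier width.
--     """
--     n = max(0, 2 * s - 1)              # number of diagonals
--     k = max(0, min(n_diags, n))        # how many are summed
--     def seg(lo, hi):                   # indices i with lo <= i < min(k, hi)
--         return max(0, min(k, hi) - lo)
--     cost = (8 * seg(0, 16) + 16 * seg(16, 32) + 32 * seg(32, 64)
--             + min(64, max_tier_width) * seg(64, 128)
--             + min(128, max_tier_width) * seg(128, 256)
--             + min(256, max_tier_width) * max(0, k - 256))
--     return cost, cost
-- ===== Notes on version B (the rewrite author's own statement) =====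
-- stated objective: faster
-- what changed: Replaces building and sorting the 2s-1 diagonals and looping over the k shortest with a closed form: the i-th shortest diagonal has length i//2+1, so the cost is tier-width times the count of indices in each tier range, computed with constant arithmetic.
import Mathlib
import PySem

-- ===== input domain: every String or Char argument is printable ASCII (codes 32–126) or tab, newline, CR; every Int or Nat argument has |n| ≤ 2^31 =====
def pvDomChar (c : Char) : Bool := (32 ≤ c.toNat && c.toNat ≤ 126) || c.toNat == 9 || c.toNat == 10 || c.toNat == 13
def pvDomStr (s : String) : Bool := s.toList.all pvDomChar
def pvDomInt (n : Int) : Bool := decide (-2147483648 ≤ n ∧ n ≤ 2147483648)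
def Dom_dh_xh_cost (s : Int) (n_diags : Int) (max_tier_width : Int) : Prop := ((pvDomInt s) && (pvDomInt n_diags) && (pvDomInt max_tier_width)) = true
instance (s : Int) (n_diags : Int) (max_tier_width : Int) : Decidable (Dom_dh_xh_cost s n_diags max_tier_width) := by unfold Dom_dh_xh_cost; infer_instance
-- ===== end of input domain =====

-- B replaces the build-sort-and-loop of A by closed-form tier arithmetic: the i-th
-- shortest diagonal has length i//2+1, so each CRC tier's contribution is its width
-- times a clamped index count (objective: faster, O(1) vs O(s log s)).
-- Python returns the tuple (cost, eqs); under the type convention it is the list [cost, eqs].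

-- ===== PORT A =====
def gradBits (length max_tier_width : Int) : Int :=
  if length ≤ 8 then 8
  else if length ≤ 16 then 16
  else if length ≤ 32 then 32
  else if length ≤ 64 then min 64 max_tier_width
  else if length ≤ 128 then min 128 max_tier_width
  else min 256 max_tier_width

def diagLengths (s : Int) : List (Int × Int) :=
  let diags := (PySem.List.pyRange 0 (2*s - 1) 1).foldl
    (fun acc d => acc ++ [(d, min (min (d + 1) s) (2*s - 1 - d))]) []
  PySem.List.sorted diags (fun x => x.2) false

def dh_xh_cost (s : Int) (n_diags : Int) (max_tier_width : Int) : List Int :=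
  let dl := diagLengths s
  let ce := (PySem.List.pyRange 0 (min n_diags (PySem.List.len dl)) 1).foldl
    (fun (ce : Int × Int) i =>
      let l := (PySem.List.pyGetD dl i (0, 0)).2
      let w := gradBits l max_tier_width
      (ce.1 + w, ce.2 + w)) (0, 0)
  [ce.1, ce.2]

-- ===== PORT B =====
def dh_xh_cost_alt (s : Int) (n_diags : Int) (max_tier_width : Int) : List Int :=
  let n := max 0 (2*s - 1)
  let k := max 0 (min n_diags n)
  let seg := fun (lo hi : Int) => max 0 (min k hi - lo)
  let cost := 8 * seg 0 16 + 16 * seg 16 32 + 32 * seg 32 64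
    + min 64 max_tier_width * seg 64 128
    + min 128 max_tier_width * seg 128 256
    + min 256 max_tier_width * max 0 (k - 256)
  [cost, cost]

-- ===== PRECONDITION & SPEC =====
def Spec_dh_xh_cost (s : Int) (n_diags : Int) (max_tier_width : Int) (out : List Int) : Prop := out = dh_xh_cost_alt s n_diags max_tier_width
instance (s : Int) (n_diags : Int) (max_tier_width : Int) (out : List Int) : Decidable (Spec_dh_xh_cost s n_diags max_tier_width out) := by unfold Spec_dh_xh_cost; infer_instance

-- ===== CLAIM (what is proved, stated in full; the proofs are below) =====
def Claim_equal_dh_xh_cost : Prop := ∀ (s : Int) (n_diags : Int) (max_tier_width : Int), Dom_dh_xh_cost s n_diags max_tier_width → Spec_dh_xh_cost s n_diags max_tier_width (dh_xh_cost s n_diags max_tier_width)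

-- ===== LEMMAS AND PROOFS =====

-- length of the i-th shortest diagonal (0-based): i/2 + 1
def patFun (i : Nat) : Int := ((i / 2 : Nat) : Int) + 1
def lenpat (N : Nat) : List Int := (List.range N).map patFun
def ascL (t : Nat) : List Int := (List.range t).map (fun (k : Nat) => (k : Int) + 1)

theorem desc_perm (t : Nat) : ((List.range t).map (fun (j : Nat) => (t : Int) - (j : Int))).Perm (ascL t) := by
  induction t with
  | zero => simp [ascL]
  | succ t ih =>
    have hs : t + 1 = 1 + t := by omega
    rw [hs, List.range_add, List.map_append, List.map_map]
    have h1 : (List.range t).map ((fun (j : Nat) => ((1 + t : Nat) : Int) - (j : Int)) ∘ (fun x => 1 + x))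
        = (List.range t).map (fun (j : Nat) => (t : Int) - (j : Int)) := by
      apply List.map_congr_left
      intro a _
      simp only [Function.comp]
      push_cast
      ring
    have h2 : ascL (1 + t) = ascL t ++ [(t:Int)+1] := by
      rw [← hs, ascL, ascL, List.range_succ]; simp
    rw [h1, h2]
    have h0 : (List.range 1).map (fun (j : Nat) => ((1 + t : Nat) : Int) - (j : Int)) = [(t:Int)+1] := by
      simp [List.range_one]; ring
    rw [h0]
    exact (ih.append_left [(t:Int)+1]).trans List.perm_append_comm

theorem lenpat_perm (t : Nat) : (lenpat (2*t + 1)).Perm (ascL (t+1) ++ ascL t) := by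
  induction t with
  | zero => simp [lenpat, ascL, patFun, List.range_succ]
  | succ t ih =>
    have hp1 : patFun (2*t+1) = (t:Int)+1 := by simp only [patFun]; omega
    have hp2 : patFun (2*t+1+1) = (t:Int)+2 := by simp only [patFun]; omega
    have h1 : 2*(t+1) + 1 = 2*t + 1 + 1 + 1 := by omega
    have e : lenpat (2*(t+1) + 1) = lenpat (2*t+1) ++ [(t:Int)+1, (t:Int)+2] := by
      rw [lenpat, h1, List.range_succ, List.range_succ]
      simp [lenpat, hp1, hp2]
    rw [e]
    have ea : ascL (t+1+1) = ascL (t+1) ++ [(t:Int)+2] := by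
      rw [ascL, ascL, List.range_succ]; simp; ring
    have eb : ascL (t+1) = ascL t ++ [(t:Int)+1] := by
      rw [ascL, ascL, List.range_succ]; simp
    have h4 : ∀ (a b : List Int) (x y : Int), ((a ++ b) ++ [x, y]).Perm ((a ++ [y]) ++ (b ++ [x])) := by
      intro a b x y
      have h2 : (a ++ b) ++ [x, y] = a ++ ((b ++ [x]) ++ [y]) := by simp
      have h3 : (a ++ [y]) ++ (b ++ [x]) = a ++ ([y] ++ (b ++ [x])) := by simp
      rw [h2, h3]
      exact (List.perm_append_comm).append_left a
    have final : (ascL (t+1+1) ++ ascL (t+1)) = (ascL (t+1) ++ [(t:Int)+2]) ++ (ascL t ++ [(t:Int)+1]) := by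
      rw [ea, eb]
    rw [final]
    exact (ih.append (List.Perm.refl _)).trans (h4 _ _ _ _)

-- the unsorted diagonals, as produced by A's construction loop
theorem diags_foldl_eq_map (s : Int) :
    (PySem.List.pyRange 0 (2*s - 1) 1).foldl
      (fun acc d => acc ++ [(d, min (min (d + 1) s) (2*s - 1 - d))]) []
    = (PySem.List.pyRange 0 (2*s - 1) 1).map
        (fun d => (d, min (min (d + 1) s) (2*s - 1 - d))) := by
  rw [PySem.List.foldl_append_singleton_eq_map]
  simp

-- the multiset of raw diagonal lengths is ascL s ++ ascL (s-1) (for s ≥ 1 via t := s-1)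
theorem raw_lengths_perm (t : Nat) :
    ((List.range (2*t+1)).map (fun (k : Nat) =>
        min (min ((k:Int) + 1) ((t:Int)+1)) (2*((t:Int)+1) - 1 - (k:Int)))).Perm
      (ascL (t+1) ++ ascL t) := by
  have hsplit : (2*t+1) = (t+1) + t := by omega
  rw [hsplit, List.range_add, List.map_append, List.map_map]
  have h1 : (List.range (t+1)).map (fun (k : Nat) =>
      min (min ((k:Int) + 1) ((t:Int)+1)) (2*((t:Int)+1) - 1 - (k:Int))) = ascL (t+1) := by
    rw [ascL]
    apply List.map_congr_left
    intro a ha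
    simp only [List.mem_range] at ha
    have h2 : ((a:Int)) ≤ (t:Int) := by exact_mod_cast Nat.lt_succ_iff.mp ha
    omega
  have h2 : (List.range t).map ((fun (k : Nat) =>
      min (min ((k:Int) + 1) ((t:Int)+1)) (2*((t:Int)+1) - 1 - (k:Int))) ∘ (fun x => (t+1) + x))
      = (List.range t).map (fun (j : Nat) => (t : Int) - (j : Int)) := by
    apply List.map_congr_left
    intro a ha
    simp only [List.mem_range] at ha
    simp only [Function.comp]
    have h3 : ((a:Int)) < (t:Int) := by exact_mod_cast ha
    push_cast
    omega
  rw [h1, h2]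
  exact (desc_perm t).append_left (ascL (t+1))

theorem sorted_snd_eq (s : Int) :
    (diagLengths s).map (fun x => x.2) = lenpat (2*s - 1).toNat := by
  by_cases hs : s ≤ 0
  · have h0 : (2*s - 1).toNat = 0 := by omega
    have h1 : PySem.List.pyRange 0 (2*s - 1) 1 = [] := PySem.List.pyRange_one_eq_nil (by omega)
    rw [diagLengths]
    simp only [h1, List.foldl_nil, h0]
    rw [(PySem.List.sorted_eq_nil_iff ([] : List (Int × Int)) (fun x => x.2) false).mpr rfl]
    simp [lenpat]
  · -- s ≥ 1
    obtain ⟨t, ht⟩ : ∃ t : Nat, s = (t : Int) + 1 := ⟨(s-1).toNat, by omega⟩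
    have hN : (2*s - 1).toNat = 2*t + 1 := by omega
    -- the sorted output's lengths are a permutation of the pattern
    have hperm : ((diagLengths s).map (fun x => x.2)).Perm (lenpat (2*t+1)) := by
      have h1 := PySem.List.sorted_perm
        ((PySem.List.pyRange 0 (2*s - 1) 1).map (fun d => (d, min (min (d + 1) s) (2*s - 1 - d))))
        (fun x => x.2) false
      have h2 : (diagLengths s).Perm
          ((PySem.List.pyRange 0 (2*s - 1) 1).map (fun d => (d, min (min (d + 1) s) (2*s - 1 - d)))) := by
        rw [diagLengths]
        simp only [diags_foldl_eq_map]
        exact h1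
      have h3 := h2.map (fun x => (x.2 : Int))
      rw [List.map_map] at h3
      have h4 : ((PySem.List.pyRange 0 (2*s - 1) 1).map
          ((fun (x : Int × Int) => x.2) ∘ (fun d => (d, min (min (d + 1) s) (2*s - 1 - d)))))
          = (List.range (2*t+1)).map (fun (k : Nat) =>
              min (min ((k:Int) + 1) ((t:Int)+1)) (2*((t:Int)+1) - 1 - (k:Int))) := by
        rw [PySem.List.pyRange_one]
        rw [List.map_map]
        have : (2*s - 1 - 0).toNat = 2*t + 1 := by omega
        rw [this]
        apply List.map_congr_left
        intro a _
        simp only [Function.comp]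
        rw [ht]
        ring_nf
      rw [h4] at h3
      exact (h3.trans (raw_lengths_perm t)).trans ((lenpat_perm t).symm)
    -- both sides sorted (≤); a permutation between sorted lists is an equality
    have hs1 : ((diagLengths s).map (fun x => x.2)).Pairwise (fun a b => a ≤ b) := by
      rw [diagLengths]
      exact PySem.List.sorted_map_key_pairwise _ _
    have hs2 : (lenpat (2*t+1)).Pairwise (fun (a b : Int) => a ≤ b) := by
      rw [lenpat]
      refine List.Pairwise.map _ ?_ (List.pairwise_lt_range)
      intro a b hab
      simp only [patFun]
      omega
    rw [hN]
    exact List.Perm.eq_of_pairwise (fun a b _ _ h1 h2 => le_antisymm h1 h2) hs1 hs2 hperm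

theorem cost_closed_form (k : Nat) (mtw : Int) :
    ((List.range k).map (fun i => gradBits (patFun i) mtw)).sum
      = 8 * max 0 (min (k : Int) 16 - 0) + 16 * max 0 (min (k : Int) 32 - 16)
        + 32 * max 0 (min (k : Int) 64 - 32)
        + min 64 mtw * max 0 (min (k : Int) 128 - 64)
        + min 128 mtw * max 0 (min (k : Int) 256 - 128)
        + min 256 mtw * max 0 ((k : Int) - 256) := by
  induction k with
  | zero => simp
  | succ k ih =>
    rw [List.range_succ, List.map_append, List.sum_append, ih]
    have hK : (0 : Int) ≤ (k : Int) := Int.natCast_nonneg k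
    have hcast : ((k + 1 : Nat) : Int) = (k : Int) + 1 := by push_cast; ring
    rw [hcast]
    have e1 : max 0 (min ((k:Int)+1) 16 - 0) = max 0 (min (k:Int) 16 - 0) + (if (k:Int) < 16 then 1 else 0) := by split_ifs <;> omega
    have e2 : max 0 (min ((k:Int)+1) 32 - 16) = max 0 (min (k:Int) 32 - 16) + (if 16 ≤ (k:Int) ∧ (k:Int) < 32 then 1 else 0) := by split_ifs <;> omega
    have e3 : max 0 (min ((k:Int)+1) 64 - 32) = max 0 (min (k:Int) 64 - 32) + (if 32 ≤ (k:Int) ∧ (k:Int) < 64 then 1 else 0) := by split_ifs <;> omega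
    have e4 : max 0 (min ((k:Int)+1) 128 - 64) = max 0 (min (k:Int) 128 - 64) + (if 64 ≤ (k:Int) ∧ (k:Int) < 128 then 1 else 0) := by split_ifs <;> omega
    have e5 : max 0 (min ((k:Int)+1) 256 - 128) = max 0 (min (k:Int) 256 - 128) + (if 128 ≤ (k:Int) ∧ (k:Int) < 256 then 1 else 0) := by split_ifs <;> omega
    have e6 : max 0 ((k:Int)+1 - 256) = max 0 ((k:Int) - 256) + (if 256 ≤ (k:Int) then 1 else 0) := by split_ifs <;> omega
    rw [e1, e2, e3, e4, e5, e6]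
    have hpat : patFun k = ((k / 2 : Nat) : Int) + 1 := rfl
    simp only [List.map_cons, List.map_nil, List.sum_cons, List.sum_nil, add_zero, gradBits, hpat]
    by_cases h1 : (k : Int) < 16
    · rw [if_pos (by omega), if_pos (by omega), if_neg (by omega), if_neg (by omega), if_neg (by omega), if_neg (by omega), if_neg (by omega)]
      ring
    · by_cases h2 : (k : Int) < 32
      · rw [if_neg (by omega), if_pos (by omega), if_neg (by omega), if_pos (by omega), if_neg (by omega), if_neg (by omega), if_neg (by omega), if_neg (by omega)]
        ring
      · by_cases h3 : (k : Int) < 64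
        · rw [if_neg (by omega), if_neg (by omega), if_pos (by omega), if_neg (by omega), if_neg (by omega), if_pos (by omega), if_neg (by omega), if_neg (by omega), if_neg (by omega)]
          ring
        · by_cases h4 : (k : Int) < 128
          · rw [if_neg (by omega), if_neg (by omega), if_neg (by omega), if_pos (by omega), if_neg (by omega), if_neg (by omega), if_neg (by omega), if_pos (by omega), if_neg (by omega), if_neg (by omega)]
            ring
          · by_cases h5 : (k : Int) < 256
            · rw [if_neg (by omega), if_neg (by omega), if_neg (by omega), if_neg (by omega), if_pos (by omega), if_neg (by omega), if_neg (by omega), if_neg (by omega), if_neg (by omega), if_pos (by omega), if_neg (by omega)]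
              ring
            · rw [if_neg (by omega), if_neg (by omega), if_neg (by omega), if_neg (by omega), if_neg (by omega), if_neg (by omega), if_neg (by omega), if_neg (by omega), if_neg (by omega), if_neg (by omega), if_pos (by omega)]
              ring

theorem diagLengths_length (s : Int) : (diagLengths s).length = (2*s - 1).toNat := by
  rw [diagLengths]
  simp only [diags_foldl_eq_map]
  rw [PySem.List.length_sorted, List.length_map, PySem.List.length_pyRange_one]
  omega

theorem main_eq (s n_diags max_tier_width : Int) :
    dh_xh_cost s n_diags max_tier_width = dh_xh_cost_alt s n_diags max_tier_width := by
  simp only [dh_xh_cost, dh_xh_cost_alt, PySem.List.len_eq]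
  set dl := diagLengths s with hdl
  have hlen : (dl.length : Int) = max 0 (2*s - 1) := by
    rw [hdl, diagLengths_length]; omega
  by_cases hm : min n_diags ((dl.length : Int)) ≤ 0
  · -- empty loop
    rw [PySem.List.pyRange_one_eq_nil (by omega)]
    have hk : max 0 (min n_diags (max 0 (2*s - 1))) = 0 := by omega
    rw [hk]
    norm_num
  · replace hm : 0 < min n_diags ((dl.length : Int)) := by omega
    set m := min n_diags ((dl.length : Int)) with hmdef
    set k := m.toNat with hk
    have hkm : (k : Int) = m := by omega
    have hkle : k ≤ dl.length := by omega
    have htakelen : (dl.take k).length = k := by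
      rw [List.length_take]; omega
    -- replace the indexed read into dl by a read into dl.take k
    have hcongr : (PySem.List.pyRange 0 m 1).foldl
        (fun (ce : Int × Int) i =>
          (ce.1 + gradBits (PySem.List.pyGetD dl i (0, 0)).2 max_tier_width,
           ce.2 + gradBits (PySem.List.pyGetD dl i (0, 0)).2 max_tier_width)) (0, 0)
        = (PySem.List.pyRange 0 m 1).foldl
        (fun (ce : Int × Int) i =>
          (ce.1 + gradBits (PySem.List.pyGetD (dl.take k) i (0, 0)).2 max_tier_width,
           ce.2 + gradBits (PySem.List.pyGetD (dl.take k) i (0, 0)).2 max_tier_width)) (0, 0) := by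
      apply PySem.List.foldl_congr_mem
      intro acc i hi
      rw [PySem.List.mem_pyRange_one] at hi
      have h1 : i < (dl.length : Int) := by omega
      have h2 : i < ((dl.take k).length : Int) := by rw [htakelen]; omega
      rw [PySem.List.pyGetD_eq_getElem dl (0,0) hi.1 h1,
          PySem.List.pyGetD_eq_getElem (dl.take k) (0,0) hi.1 h2]
      simp [List.getElem_take]
    rw [hcongr]
    have hmlen : m = ((dl.take k).length : Int) := by rw [htakelen]; omega
    rw [hmlen, PySem.List.foldl_pyRange_zero_pyGetD' (dl.take k) (0,0)
      (fun (ce : Int × Int) p =>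
        (ce.1 + gradBits p.2 max_tier_width, ce.2 + gradBits p.2 max_tier_width)) (0,0)]
    rw [PySem.List.foldl_prod_mk (f := fun a (p : Int × Int) => a + gradBits p.2 max_tier_width)
      (g := fun a (p : Int × Int) => a + gradBits p.2 max_tier_width)]
    rw [PySem.List.foldl_add]
    -- turn the sum over pairs into the sum over the sorted-length pattern
    have hmap : (dl.take k).map (fun p => gradBits p.2 max_tier_width)
        = (List.range k).map (fun i => gradBits (patFun i) max_tier_width) := by
      have h1 : (dl.take k).map (fun p => gradBits p.2 max_tier_width)
          = ((dl.map (fun x => x.2)).take k).map (fun l => gradBits l max_tier_width) := by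
        rw [← List.map_take, List.map_map]
        rfl
      rw [h1, hdl, sorted_snd_eq, lenpat, ← List.map_take, List.take_range, List.map_map]
      have h2 : min k (2*s - 1).toNat = k := by
        have := hkle
        rw [hdl, diagLengths_length] at this
        omega
      rw [h2]
      rfl
    rw [hmap, cost_closed_form]
    have hkB : max 0 (min n_diags (max 0 (2*s - 1))) = (k : Int) := by omega
    rw [hkB]
    norm_num

-- ===== VERDICT (by name: the statement is the Claim_ definition above) =====
theorem dh_xh_cost_spec : Claim_equal_dh_xh_cost := by
  intro s n_diags max_tier_width _
  unfold Spec_dh_xh_cost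
  exact main_eq s n_diags max_tier_width
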